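-- pv_equiv track=rewrite | github.com/uvsq22102239/l1-python | exercises/TD04_listes/carre_magique.py | estNormal
-- ===== SOURCE A (Python) =====
-- def estNormal(carre):
--     """ Retourne True si contient toutes les valeurs de 1 à n^2 où n est la taille
--         du carré, et False sinon """
--     all = []
--     for ligne in carre:
--         for elem in ligne:
--             if all.count(elem) > 0:
--                 return False
--             all.append(elem)
--
--     taille = len(carre)
--     if all[0] != pow(taille, 2):
--         return False
--
--     return True
-- ===== SOURCE B (Python) =====
-- def estNormal(carre):
--     flat = [e for ligne in carre for e in ligne]
--     s = sorted(flat)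
--     if any(x == y for x, y in zip(s, s[1:])):
--         return False
--     if flat[0] != len(carre) ** 2:
--         return False
--     return True
-- ===== Notes on version B (the rewrite author's own statement) =====
-- stated objective: simpler
-- what changed: Replaces the incremental quadratic count-then-append duplicate scan with a build-then-bulk check: flatten once, sort a copy and test adjacent pairs for equality, then apply the same first-element-vs-n^2 test.
import Mathlib
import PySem

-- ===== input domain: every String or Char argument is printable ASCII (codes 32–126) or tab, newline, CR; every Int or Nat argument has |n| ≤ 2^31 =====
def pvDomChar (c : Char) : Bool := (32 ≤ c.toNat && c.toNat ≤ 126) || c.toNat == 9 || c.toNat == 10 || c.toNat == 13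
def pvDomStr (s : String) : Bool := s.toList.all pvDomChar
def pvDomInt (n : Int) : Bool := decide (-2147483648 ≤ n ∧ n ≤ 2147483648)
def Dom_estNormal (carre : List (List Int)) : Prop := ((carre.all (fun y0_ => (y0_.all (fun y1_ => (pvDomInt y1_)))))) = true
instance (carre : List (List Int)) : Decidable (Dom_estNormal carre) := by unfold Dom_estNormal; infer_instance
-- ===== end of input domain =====

-- B flattens once, sorts a copy and rejects on any equal adjacent pair, then applies
-- the same flat[0] != len(carre)**2 test (objective: simpler bulk check instead of the
-- quadratic incremental count/append scan).

-- ===== PORT A =====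
-- inner 'for elem in ligne' loop: none = early 'return False' on a duplicate
def estNormalInner : List Int → List Int → Option (List Int)
  | [], all => some all
  | elem :: rest, all =>
      if PySem.List.count all elem > 0 then none
      else estNormalInner rest (all ++ [elem])

-- outer 'for ligne in carre' loop
def estNormalOuter : List (List Int) → List Int → Option (List Int)
  | [], all => some all
  | ligne :: rest, all =>
      match estNormalInner ligne all with
      | none => none
      | some all' => estNormalOuter rest all'

def estNormal (carre : List (List Int)) : Bool :=
  match estNormalOuter carre [] with
  | none => false
  | some all =>
      match PySem.List.pyGet? all 0 with
      | none => false  -- all[0] raises IndexError in Python; excluded by Pre_estNormal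
      | some x => if x ≠ (carre.length : Int) ^ 2 then false else true

-- ===== PORT B =====
def estNormal_alt (carre : List (List Int)) : Bool :=
  let flat := carre.flatMap (fun ligne => ligne)
  let s := PySem.List.sorted flat (fun x => x) false
  if (s.zip (s.drop 1)).any (fun p => p.1 == p.2) then false
  else
    match PySem.List.pyGet? flat 0 with
    | none => false  -- flat[0] raises IndexError in Python; excluded by Pre_estNormal
    | some x => if x ≠ (carre.length : Int) ^ 2 then false else true

-- ===== PRECONDITION & SPEC =====
-- Pre_ excludes exactly the squares whose flattened element list is empty: there A
-- (and B) raises IndexError at all[0].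
def Pre_estNormal (carre : List (List Int)) : Prop :=
  carre.flatMap (fun ligne => ligne) ≠ []
instance (carre : List (List Int)) : Decidable (Pre_estNormal carre) := by
  unfold Pre_estNormal; infer_instance
def pvWitness_estNormal : List (List Int) := [[4, 2], [3, 1]]

def Spec_estNormal (carre : List (List Int)) (out : Bool) : Prop := out = estNormal_alt carre
instance (carre : List (List Int)) (out : Bool) : Decidable (Spec_estNormal carre out) := by
  unfold Spec_estNormal; infer_instance

-- ===== CLAIM (what is proved, stated in full; the proofs are below) =====
def Claim_equal_estNormal : Prop :=
  ∀ (carre : List (List Int)), Dom_estNormal carre → Pre_estNormal carre →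
    Spec_estNormal carre (estNormal carre)

-- ===== LEMMAS AND PROOFS =====

theorem inner_spec (ligne : List Int) (all : List Int) (h : all.Nodup) :
    estNormalInner ligne all =
      if (all ++ ligne).Nodup then some (all ++ ligne) else none := by
  induction ligne generalizing all with
  | nil => simp [estNormalInner, h]
  | cons e rest ih =>
    simp only [estNormalInner]
    by_cases he : e ∈ all
    · have : PySem.List.count all e > 0 := by
        simpa [PySem.List.count, List.count_pos_iff] using he
      rw [if_pos this]
      have : ¬ (all ++ e :: rest).Nodup := by
        intro h1
        exact (List.disjoint_of_nodup_append h1) he (by simp)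
      rw [if_neg this]
    · have hc : ¬ PySem.List.count all e > 0 := by
        simpa [PySem.List.count, List.count_pos_iff] using he
      rw [if_neg hc]
      have hnd : (all ++ [e]).Nodup := by
        simp only [List.nodup_append, List.nodup_cons, List.not_mem_nil, not_false_iff,
          List.nodup_nil, and_true, true_and]
        exact ⟨h, fun a ha => by simp; rintro rfl; exact he ha⟩
      rw [ih _ hnd]
      have harr : all ++ e :: rest = (all ++ [e]) ++ rest := by simp
      rw [harr]

theorem outer_spec (rows : List (List Int)) (all : List Int) (h : all.Nodup) :
    estNormalOuter rows all =
      if (all ++ rows.flatMap (fun l => l)).Nodup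
      then some (all ++ rows.flatMap (fun l => l)) else none := by
  induction rows generalizing all with
  | nil => simp [estNormalOuter, h]
  | cons l rest ih =>
    simp only [estNormalOuter]
    rw [inner_spec _ _ h]
    have harr : all ++ (l :: rest).flatMap (fun l => l)
        = (all ++ l) ++ rest.flatMap (fun l => l) := by simp
    by_cases hi : (all ++ l).Nodup
    · rw [if_pos hi]
      show estNormalOuter rest (all ++ l) = _
      rw [ih _ hi, harr]
    · rw [if_neg hi]
      show (none : Option (List Int)) = _
      rw [if_neg]
      intro h1
      rw [harr] at h1
      exact hi (h1.sublist (List.sublist_append_left _ _))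

theorem zip_any_eq_false_iff (s : List Int) :
    ((s.zip (s.drop 1)).any (fun p => p.1 == p.2) = false) ↔ s.IsChain (· ≠ ·) := by
  induction s with
  | nil => simp
  | cons a t ih =>
    cases t with
    | nil => simp
    | cons b t' =>
      rw [List.isChain_cons_cons]
      simp only [List.drop_succ_cons, List.drop_zero, List.zip_cons_cons, List.any_cons,
        Bool.or_eq_false_iff] at *
      constructor
      · rintro ⟨h1, h2⟩
        exact ⟨by simpa using h1, ih.1 h2⟩
      · rintro ⟨h1, h2⟩
        exact ⟨by simpa using h1, ih.2 h2⟩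

theorem sorted_isChain_ne_iff_nodup (flat : List Int) :
    (PySem.List.sorted flat (fun x => x) false).IsChain (· ≠ ·) ↔ flat.Nodup := by
  have hperm : (PySem.List.sorted flat (fun x => x) false).Perm flat :=
    PySem.List.sorted_perm ..
  constructor
  · intro hch
    have hle : (PySem.List.sorted flat (fun x => x) false).Pairwise (· ≤ ·) := by
      simpa using PySem.List.sorted_pairwise (xs := flat) (key := fun x => x)
    have hlt : (PySem.List.sorted flat (fun x => x) false).IsChain (· < ·) := by
      rw [List.isChain_iff_getElem] at hch ⊢
      rw [List.pairwise_iff_getElem] at hle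
      intro i h
      exact lt_of_le_of_ne (hle i (i + 1) (by omega) h (by omega)) (hch i h)
    have : (PySem.List.sorted flat (fun x => x) false).Pairwise (· < ·) :=
      List.isChain_iff_pairwise.mp hlt
    exact hperm.nodup_iff.mp (this.imp ne_of_lt)
  · intro hnd
    have hpw : (PySem.List.sorted flat (fun x => x) false).Pairwise (· ≠ ·) :=
      hperm.nodup_iff.mpr hnd
    rw [List.pairwise_iff_getElem] at hpw
    rw [List.isChain_iff_getElem]
    intro i h
    exact hpw i (i + 1) (by omega) h (by omega)

theorem zip_any_eq (flat : List Int) :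
    (((PySem.List.sorted flat (fun x => x) false).zip
        ((PySem.List.sorted flat (fun x => x) false).drop 1)).any
        (fun p => p.1 == p.2)) = !decide flat.Nodup := by
  by_cases h : flat.Nodup
  · have hfalse := (zip_any_eq_false_iff _).mpr ((sorted_isChain_ne_iff_nodup flat).mpr h)
    rw [hfalse]
    simp [h]
  · have htrue : ¬ ((((PySem.List.sorted flat (fun x => x) false).zip
        ((PySem.List.sorted flat (fun x => x) false).drop 1)).any
        (fun p => p.1 == p.2)) = false) := by
      intro hc
      exact h ((sorted_isChain_ne_iff_nodup flat).mp ((zip_any_eq_false_iff _).mp hc))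
    simp only [Bool.not_eq_false] at htrue
    rw [htrue]
    simp [h]

theorem estNormal_eq (carre : List (List Int)) :
    estNormal carre = estNormal_alt carre := by
  unfold estNormal estNormal_alt
  rw [outer_spec _ _ List.nodup_nil]
  simp only [List.nil_append, zip_any_eq]
  by_cases h : carre.flatten.Nodup
  · simp [h]
  · simp [h]

-- ===== VERDICT (by name: the statement is the Claim_ definition above) =====
theorem estNormal_spec : Claim_equal_estNormal := by
  intro carre _ _
  unfold Spec_estNormal
  exact estNormal_eq carre
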